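-- pv_equiv track=rewrite | github.com/skamkam/algo-practice | csc252/csc252-hwk2/csc252-hwk2-code.py | swapcopy
-- ===== SOURCE A (Python) =====
-- def new_array(size: int):
--     L = [0] * size
--     return L
--
-- def swapcopy(arr, pos1, pos2):
--     n = len(arr)
--     copyarr = new_array(n)
--     if n == 0 or pos1 >= n or pos2 >= n or pos1 < 0 or pos2 < 0:  # empty arr or bad position inputs
--         for i in range(n):
--             copyarr[i] = arr[i]
--     else:       # inputs good, makes a copy with swaps
--         for i in range(n):
--             if i == pos1:
--                 copyarr[i] = arr[pos2]
--             elif i == pos2: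
--                 copyarr[i] = arr[pos1]
--             else:
--                 copyarr[i] = arr[i]
--     return copyarr
-- ===== SOURCE B (Python) =====
-- def swapcopy(arr, pos1, pos2):
--     n = len(arr)
--     copyarr = list(arr)
--     if n != 0 and 0 <= pos1 < n and 0 <= pos2 < n:
--         copyarr[pos1], copyarr[pos2] = arr[pos2], arr[pos1]
--     return copyarr
-- ===== Notes on version B (the rewrite author's own statement) =====
-- stated objective: simpler
-- what changed: Replaces the per-element loop with a conditional three-way branch by a bulk list(arr) copy followed by a single tuple-assignment swap of the two positions when they are valid.
import Mathlib
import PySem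

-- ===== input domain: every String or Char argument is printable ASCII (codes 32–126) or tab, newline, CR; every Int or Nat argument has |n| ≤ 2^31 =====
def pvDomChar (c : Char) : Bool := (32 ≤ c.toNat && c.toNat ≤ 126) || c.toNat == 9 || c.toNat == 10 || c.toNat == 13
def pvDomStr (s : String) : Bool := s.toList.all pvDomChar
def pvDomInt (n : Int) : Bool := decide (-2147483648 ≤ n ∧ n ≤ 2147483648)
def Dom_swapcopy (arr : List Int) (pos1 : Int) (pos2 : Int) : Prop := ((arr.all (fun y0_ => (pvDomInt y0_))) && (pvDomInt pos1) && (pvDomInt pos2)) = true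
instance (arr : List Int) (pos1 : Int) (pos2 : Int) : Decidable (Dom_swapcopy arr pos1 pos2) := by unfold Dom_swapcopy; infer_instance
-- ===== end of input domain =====

-- B replaces A's per-element conditional copy loop by a bulk copy plus one two-position swap (objective: simpler).

-- ===== PORT A =====
-- new_array(size) = [0]*size
def new_array (size : Int) : List Int := List.replicate size.toNat 0

def swapcopy (arr : List Int) (pos1 : Int) (pos2 : Int) : List Int :=
  if (arr.length : Int) = 0 ∨ pos1 ≥ (arr.length : Int) ∨ pos2 ≥ (arr.length : Int) ∨ pos1 < 0 ∨ pos2 < 0 then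
    (PySem.List.pyRange 0 (arr.length : Int) 1).foldl
      (fun acc i => acc.set i.toNat (PySem.List.pyGetD arr i 0))
      (new_array (arr.length : Int))
  else
    (PySem.List.pyRange 0 (arr.length : Int) 1).foldl
      (fun acc i =>
        acc.set i.toNat
          (if i = pos1 then PySem.List.pyGetD arr pos2 0
           else if i = pos2 then PySem.List.pyGetD arr pos1 0
           else PySem.List.pyGetD arr i 0))
      (new_array (arr.length : Int))

-- ===== PORT B =====
def swapcopy_alt (arr : List Int) (pos1 : Int) (pos2 : Int) : List Int :=
  -- copyarr = list(arr); the valid-index guard; then one simultaneous two-position assignment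
  if (arr.length : Int) ≠ 0 ∧ 0 ≤ pos1 ∧ pos1 < (arr.length : Int) ∧ 0 ≤ pos2 ∧ pos2 < (arr.length : Int) then
    (arr.set pos1.toNat (PySem.List.pyGetD arr pos2 0)).set pos2.toNat (PySem.List.pyGetD arr pos1 0)
  else
    arr

-- ===== PRECONDITION & SPEC =====
def Spec_swapcopy (arr : List Int) (pos1 : Int) (pos2 : Int) (out : List Int) : Prop := out = swapcopy_alt arr pos1 pos2
instance (arr : List Int) (pos1 : Int) (pos2 : Int) (out : List Int) : Decidable (Spec_swapcopy arr pos1 pos2 out) := by unfold Spec_swapcopy; infer_instance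

-- ===== CLAIM (what is proved, stated in full; the proofs are below) =====
def Claim_equal_swapcopy : Prop := ∀ (arr : List Int) (pos1 : Int) (pos2 : Int), Dom_swapcopy arr pos1 pos2 → Spec_swapcopy arr pos1 pos2 (swapcopy arr pos1 pos2)

-- ===== LEMMAS AND PROOFS =====

-- length is preserved by the overwrite loop
theorem foldl_set_range_length (g : Int → Int) :
    ∀ (n : Nat) (cs : List Int),
      ((List.range n).foldl (fun acc i => acc.set i (g (i : Int))) cs).length = cs.length := by
  intro n
  induction n with
  | zero => intro cs; simp
  | succ m ih =>
    intro cs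
    rw [List.range_succ, List.foldl_append]
    simp [ih]

-- the overwrite loop, element by element: positions already visited hold g, the rest keep cs
theorem foldl_set_range_getElem? (g : Int → Int) :
    ∀ (n : Nat) (cs : List Int) (j : Nat),
      ((List.range n).foldl (fun acc i => acc.set i (g (i : Int))) cs)[j]? =
        if j < n ∧ j < cs.length then some (g (j : Int)) else (cs)[j]? := by
  intro n
  induction n with
  | zero => intro cs j; simp
  | succ m ih =>
    intro cs j
    rw [List.range_succ, List.foldl_append]
    simp only [List.foldl_cons, List.foldl_nil]
    rw [List.getElem?_set, foldl_set_range_length, ih]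
    by_cases hj : j = m
    · subst hj
      by_cases h : j < cs.length <;> simp [h]
    · have hmj : ¬ (m = j) := fun h => hj h.symm
      have heq : (j < m + 1 ∧ j < cs.length) ↔ (j < m ∧ j < cs.length) := by omega
      simp only [hmj, if_false, heq]

theorem pyGetD_at_nat (arr : List Int) (j : Nat) (hj : j < arr.length) :
    PySem.List.pyGetD arr (j : Int) 0 = arr[j] := by
  rw [PySem.List.pyGetD_natCast]
  simp [hj]

-- A's loop runs over range(n) for n = len(arr): move pyRange to List.range
theorem foldl_pyRange_to_range (f : List Int → Int → List Int) (cs : List Int) (n : Nat) :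
    (PySem.List.pyRange 0 (n : Int) 1).foldl f cs = (List.range n).foldl (fun (acc : List Int) (i : Nat) => f acc (i : Int)) cs := by
  have h1 : PySem.List.pyRange 0 (n : Int) 1 = (List.range n).map (fun k : Nat => (0 : Int) + (k : Int)) := by
    rw [PySem.List.pyRange_one 0 (n : Int)]
    have h2 : ((n : Int) - 0).toNat = n := by omega
    rw [h2]
  rw [h1, List.foldl_map]
  simp only [zero_add]

-- ===== VERDICT (by name: the statement is the Claim_ definition above) =====
theorem swapcopy_spec : Claim_equal_swapcopy := by
  intro arr pos1 pos2 _
  unfold Spec_swapcopy swapcopy swapcopy_alt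
  by_cases hval : (arr.length : Int) ≠ 0 ∧ 0 ≤ pos1 ∧ pos1 < (arr.length : Int) ∧ 0 ≤ pos2 ∧ pos2 < (arr.length : Int)
  · -- valid indices: A takes the else branch, B swaps
    have hA : ¬ ((arr.length : Int) = 0 ∨ pos1 ≥ (arr.length : Int) ∨ pos2 ≥ (arr.length : Int) ∨ pos1 < 0 ∨ pos2 < 0) := by
      omega
    rw [if_neg hA, if_pos hval]
    obtain ⟨h0, h1a, h1b, h2a, h2b⟩ := hval
    apply List.ext_getElem?
    intro j
    rw [foldl_pyRange_to_range]
    have hconv : ∀ (acc : List Int) (i : Nat),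
        acc.set ((i : Int)).toNat
          (if (i : Int) = pos1 then PySem.List.pyGetD arr pos2 0
           else if (i : Int) = pos2 then PySem.List.pyGetD arr pos1 0
           else PySem.List.pyGetD arr (i : Int) 0)
        = acc.set i
          ((fun k : Int => if k = pos1 then PySem.List.pyGetD arr pos2 0
             else if k = pos2 then PySem.List.pyGetD arr pos1 0
             else PySem.List.pyGetD arr k 0) (i : Int)) := by
      intro acc i; rfl
    simp only [hconv]
    rw [foldl_set_range_getElem? (fun k : Int => if k = pos1 then PySem.List.pyGetD arr pos2 0
          else if k = pos2 then PySem.List.pyGetD arr pos1 0 else PySem.List.pyGetD arr k 0)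
        arr.length (new_array ((arr.length : Nat) : Int)) j]
    have hna : (new_array (arr.length : Int)).length = arr.length := by
      simp [new_array]
    rw [hna]
    by_cases hj : j < arr.length
    · rw [if_pos ⟨hj, hj⟩]
      rw [List.getElem?_set]
      have hlenset : (arr.set pos1.toNat (PySem.List.pyGetD arr pos2 0)).length = arr.length := by simp
      rw [hlenset]
      by_cases hj2 : pos2.toNat = j
      · have hj2' : (j : Int) = pos2 := by omega
        rw [if_pos hj2, if_pos (show pos2.toNat < arr.length by omega)]
        by_cases he : (j : Int) = pos1
        · rw [if_pos he]
          have hpp : pos1 = pos2 := by omega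
          rw [hpp]
        · rw [if_neg he, if_pos hj2']
      · have hj2' : ¬ ((j : Int) = pos2) := by omega
        rw [if_neg hj2, if_neg hj2']
        rw [List.getElem?_set]
        by_cases hj1 : pos1.toNat = j
        · have hj1' : (j : Int) = pos1 := by omega
          rw [if_pos hj1, if_pos hj1', if_pos (show pos1.toNat < arr.length by omega)]
        · have hj1' : ¬ ((j : Int) = pos1) := by omega
          rw [if_neg hj1, if_neg hj1', pyGetD_at_nat arr j hj]
          simp [hj]
    · rw [if_neg (by omega : ¬ (j < arr.length ∧ j < arr.length))]
      rw [List.getElem?_eq_none (by simp [new_array]; omega),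
          List.getElem?_eq_none (by simp; omega)]
  · -- invalid: A copies element-wise, B returns the bulk copy unchanged
    have hA : (arr.length : Int) = 0 ∨ pos1 ≥ (arr.length : Int) ∨ pos2 ≥ (arr.length : Int) ∨ pos1 < 0 ∨ pos2 < 0 := by
      omega
    rw [if_pos hA, if_neg hval]
    apply List.ext_getElem?
    intro j
    rw [foldl_pyRange_to_range]
    have hconv : ∀ (acc : List Int) (i : Nat),
        acc.set ((i : Int)).toNat (PySem.List.pyGetD arr (i : Int) 0)
        = acc.set i ((fun k : Int => PySem.List.pyGetD arr k 0) (i : Int)) := by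
      intro acc i; rfl
    simp only [hconv]
    rw [foldl_set_range_getElem? (fun k : Int => PySem.List.pyGetD arr k 0)
        arr.length (new_array ((arr.length : Nat) : Int)) j]
    have hna : (new_array (arr.length : Int)).length = arr.length := by
      simp [new_array]
    rw [hna]
    by_cases hj : j < arr.length
    · rw [if_pos ⟨hj, hj⟩, pyGetD_at_nat arr j hj]
      simp [hj]
    · rw [if_neg (by omega : ¬ (j < arr.length ∧ j < arr.length))]
      rw [List.getElem?_eq_none (by simp [new_array]; omega),
          List.getElem?_eq_none (by omega)]
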